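-- pv_equiv track=rewrite | github.com/tkxksdl2/algorithm-programers | [backjoon]/backtracking/[2] n과 m 2/solution.py | solution
-- ===== SOURCE A (Python) =====
-- def solution(lst, m, res, ret):
--     for i in range(len(lst)-m+1):
--         res += [lst[i]]
--         if m == 1:
--             ret.append(res.copy())
--         else:
--             solution(lst[i+1:], m-1, res, ret)
--         res.pop()
--
--     return ret
-- ===== SOURCE B (Python) =====
-- def solution(lst, m, res, ret):
--     # Bottom-up DP over suffixes: levels[k] = list of all k-combinations (in
--     # index-lexicographic order) of the suffix of lst processed so far.
--     # Size-m combinations exist only for 0 <= m <= len(lst).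
--     if 0 <= m <= len(lst):
--         levels = [[[]]] + [[] for _ in range(m)]
--         for x in reversed(lst):
--             levels = [[[]]] + [[[x] + c for c in prev] + cur
--                                for prev, cur in zip(levels, levels[1:])]
--         prefix = list(res)
--         for c in levels[m]:
--             ret.append(prefix + c)
--     return ret
-- ===== Notes on version B (the rewrite author's own statement) =====
-- stated objective: alternative
-- what changed: Replaced A's backtracking recursion (which repeatedly slices lst and pushes/pops a shared res accumulator) by a non-recursive bottom-up dynamic program over suffixes of lst that maintains, for each size k <= m, the list of k-combinations of the suffix processed so far, then appends res-prefixed copies of the size-m table to ret; inputs with m <= 0, on which A always raises IndexError, are excluded by Pre_.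
import Mathlib
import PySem

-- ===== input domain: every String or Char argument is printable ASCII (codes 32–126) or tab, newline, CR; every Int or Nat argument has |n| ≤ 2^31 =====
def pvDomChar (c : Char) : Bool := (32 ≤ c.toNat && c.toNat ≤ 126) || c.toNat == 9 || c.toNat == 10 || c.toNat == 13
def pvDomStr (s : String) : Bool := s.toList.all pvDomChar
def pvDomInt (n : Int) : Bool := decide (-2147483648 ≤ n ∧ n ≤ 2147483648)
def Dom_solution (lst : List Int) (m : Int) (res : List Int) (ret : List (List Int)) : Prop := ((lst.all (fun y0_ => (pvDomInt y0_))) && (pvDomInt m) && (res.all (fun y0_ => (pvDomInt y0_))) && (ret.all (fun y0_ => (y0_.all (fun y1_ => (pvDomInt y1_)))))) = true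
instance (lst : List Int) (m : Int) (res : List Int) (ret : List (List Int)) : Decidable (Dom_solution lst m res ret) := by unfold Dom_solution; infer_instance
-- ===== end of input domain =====

-- B replaces A's backtracking recursion (which mutates a shared `res`) by a bottom-up
-- DP over suffixes of lst; the equivalence is about the RETURN value (A also mutates
-- `ret` in place; B appends to `ret` the same way, and both leave `res` net-unchanged).

-- ===== PORT A =====
def solutionGo (lst : List Int) (m : Int) (res : List Int) (ret : List (List Int)) (i : Nat) :
    List (List Int) :=
  if i < ((lst.length : Int) - m + 1).toNat then
    if hi : i < lst.length then   -- lst[i]; Python raises IndexError when i ≥ len (only for m ≤ 0, outside Pre_)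
      solutionGo lst m res
        (if m = 1 then ret ++ [res ++ [lst[i]]]   -- res += [lst[i]]; ret.append(res.copy()); res.pop()
         else solutionGo (PySem.List.slice lst (some ((i : Int) + 1)) none) (m - 1)
                (res ++ [lst[i]]) ret 0)
        (i + 1)
    else ret
  else ret
termination_by lst.length - i
decreasing_by
  · have : (PySem.List.slice lst (some ((i : Int) + 1)) none).length = lst.length - (i + 1) := by
      have h : ((i : Int) + 1) = ((i + 1 : Nat) : Int) := by push_cast; ring
      rw [h, PySem.List.slice_from_natCast, List.length_drop]
    omega
  · omega

def solution (lst : List Int) (m : Int) (res : List Int) (ret : List (List Int)) : List (List Int) :=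
  solutionGo lst m res ret 0

-- ===== PORT B =====
def solution_alt (lst : List Int) (m : Int) (res : List Int) (ret : List (List Int)) :
    List (List Int) :=
  if 0 ≤ m ∧ m ≤ (lst.length : Int) then
    (PySem.List.pyGetD
        (lst.reverse.foldl
          (fun levels x =>
            [[([] : List Int)]] ++
              List.zipWith (fun prev cur => prev.map (fun c => x :: c) ++ cur)
                levels (PySem.List.slice levels (some 1) none))
          ([[[]]] ++ List.replicate m.toNat []))
        m []).foldl (fun acc c => acc ++ [res ++ c]) ret
  else ret

-- ===== PRECONDITION & SPEC =====
-- Pre_ excludes exactly m ≤ 0, on which Python A always raises IndexError (lst[i] past the end).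
def Pre_solution (lst : List Int) (m : Int) (res : List Int) (ret : List (List Int)) : Prop :=
  1 ≤ m
instance (lst : List Int) (m : Int) (res : List Int) (ret : List (List Int)) :
    Decidable (Pre_solution lst m res ret) := by unfold Pre_solution; infer_instance

def pvWitness_solution : List Int × Int × List Int × List (List Int) := ([1, 2, 3], 2, [], [])

def Spec_solution (lst : List Int) (m : Int) (res : List Int) (ret : List (List Int))
    (out : List (List Int)) : Prop := out = solution_alt lst m res ret
instance (lst : List Int) (m : Int) (res : List Int) (ret : List (List Int))
    (out : List (List Int)) : Decidable (Spec_solution lst m res ret out) := by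
  unfold Spec_solution; infer_instance

-- ===== CLAIM (what is proved, stated in full; the proofs are below) =====
def Claim_equal_solution : Prop := ∀ (lst : List Int) (m : Int) (res : List Int) (ret : List (List Int)), Dom_solution lst m res ret → Pre_solution lst m res ret → Spec_solution lst m res ret (solution lst m res ret)

-- ===== LEMMAS AND PROOFS =====

-- zipWith of a range'-map with its own tail
theorem zip_tail_range' {α β : Type} (f : α → α → β) (g : Nat → α) :
    ∀ (n k : Nat),
      List.zipWith f ((List.range' k (n + 1)).map g) (((List.range' k (n + 1)).map g).tail)
        = (List.range' k n).map (fun j => f (g j) (g (j + 1))) := by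
  intro n
  induction n with
  | zero => intro k; simp [List.range'_succ]
  | succ n ih =>
    intro k
    have h1 : List.range' k (n + 2) = k :: List.range' (k + 1) (n + 1) := List.range'_succ
    have h2 : List.range' (k + 1) (n + 1) = (k + 1) :: List.range' (k + 2) n := List.range'_succ
    have h3 : List.range' k (n + 1) = k :: List.range' (k + 1) n := List.range'_succ
    rw [h1, h3]
    simp only [List.map_cons, List.tail_cons]
    have htl := ih (k + 1)
    rw [h2] at htl ⊢
    simp only [List.map_cons, List.zipWith_cons_cons]
    simp only [List.map_cons, List.tail_cons] at htl
    rw [htl]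

-- one DP step: the levels table for suffix s becomes the table for x :: s
theorem step_levels (x : Int) (m : Nat) (s : List Int) :
    ([[([] : List Int)]] ++
        List.zipWith (fun prev cur => prev.map (fun c => x :: c) ++ cur)
          ((List.range (m + 1)).map (fun k => PySem.List.combinations s k))
          (PySem.List.slice ((List.range (m + 1)).map (fun k => PySem.List.combinations s k))
            (some 1) none))
      = (List.range (m + 1)).map (fun k => PySem.List.combinations (x :: s) k) := by
  rw [PySem.List.slice_from_one, List.range_eq_range',
    zip_tail_range' (fun prev cur => prev.map (fun c => x :: c) ++ cur)
      (fun k => PySem.List.combinations s k) m 0]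
  rw [List.range'_succ]
  simp only [List.map_cons, PySem.List.combinations_zero, List.singleton_append]
  congr 1
  rw [List.range'_eq_map_range (s := 1), List.range'_eq_map_range (s := 0)]
  simp only [List.map_map]
  apply List.map_congr_left
  intro j _
  simp only [Function.comp_apply, Nat.zero_add, Nat.add_comm 1 j]
  exact (PySem.List.combinations_cons_succ x s j).symm

-- the whole DP fold computes the table of combinations of s
theorem levels_inv (m : Nat) (s : List Int) :
    s.foldr
        (fun x levels =>
          [[([] : List Int)]] ++
            List.zipWith (fun prev cur => prev.map (fun c => x :: c) ++ cur)
              levels (PySem.List.slice levels (some 1) none))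
        ([[[]]] ++ List.replicate m ([] : List (List Int)))
      = (List.range (m + 1)).map (fun k => PySem.List.combinations s k) := by
  induction s with
  | nil =>
    simp only [List.foldr_nil]
    induction m with
    | zero => simp [PySem.List.combinations_zero]
    | succ m ih =>
      rw [List.range_succ, List.map_append, ← ih]
      simp [List.replicate_succ' (n := m), PySem.List.combinations_nil_succ]
  | cons x s ih =>
    rw [List.foldr_cons, ih, step_levels]

-- B returns ret ++ the m-combinations, each prefixed by res
theorem alt_eq (lst : List Int) (m : Int) (res : List Int) (ret : List (List Int)) (hm : 0 ≤ m) :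
    solution_alt lst m res ret
      = ret ++ (PySem.List.combinations lst m.toNat).map (fun c => res ++ c) := by
  unfold solution_alt
  by_cases hle : m ≤ (lst.length : Int)
  · rw [if_pos ⟨hm, hle⟩]
    simp only [List.foldl_reverse]
    rw [levels_inv m.toNat lst]
    have hget : PySem.List.pyGetD
          ((List.range (m.toNat + 1)).map (fun k => PySem.List.combinations lst k)) m []
        = PySem.List.combinations lst m.toNat := by
      rw [PySem.List.pyGetD_eq_getElem _ _ hm (by simp)]
      simp
    rw [hget, PySem.List.foldl_append_singleton_eq_map]
  · rw [if_neg (by tauto)]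
    rw [PySem.List.combinations_eq_nil_of_length_lt lst (by omega)]
    simp

-- A's backtracking loop, characterised: from index i on it appends the combinations of lst.drop i
theorem go_eq : ∀ (n : Nat) (lst : List Int) (m : Int) (res : List Int) (ret : List (List Int))
    (i : Nat), lst.length - i ≤ n → 1 ≤ m →
    solutionGo lst m res ret i
      = ret ++ (PySem.List.combinations (lst.drop i) m.toNat).map (fun c => res ++ c) := by
  intro n
  induction n with
  | zero =>
    intro lst m res ret i hn hm
    rw [solutionGo, if_neg (by omega)]
    rw [PySem.List.combinations_eq_nil_of_length_lt (lst.drop i)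
      (by rw [List.length_drop]; omega)]
    simp
  | succ n ih =>
    intro lst m res ret i hn hm
    rw [solutionGo]
    by_cases hb : i < ((lst.length : Int) - m + 1).toNat
    · rw [if_pos hb]
      have hi : i < lst.length := by omega
      rw [dif_pos hi]
      have hdrop : lst.drop i = lst[i] :: lst.drop (i + 1) := List.drop_eq_getElem_cons hi
      have hslice : PySem.List.slice lst (some ((i : Int) + 1)) none = lst.drop (i + 1) := by
        have h : ((i : Int) + 1) = ((i + 1 : Nat) : Int) := by push_cast; ring
        rw [h, PySem.List.slice_from_natCast]
      by_cases h1 : m = 1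
      · subst h1
        rw [if_pos rfl]
        rw [ih lst 1 res (ret ++ [res ++ [lst[i]]]) (i + 1) (by omega) (by omega)]
        rw [hdrop]
        rw [show ((1 : Int)).toNat = 0 + 1 from rfl, PySem.List.combinations_cons_succ,
          PySem.List.combinations_zero]
        simp
      · rw [if_neg h1]
        have hm2 : 2 ≤ m := by
          rcases lt_or_ge m 2 with h | h
          · exact absurd (by omega : m = 1) h1
          · exact h
        rw [hslice]
        rw [ih (lst.drop (i + 1)) (m - 1) (res ++ [lst[i]]) ret 0
          (by rw [List.length_drop]; omega) (by omega)]
        rw [ih lst m res _ (i + 1) (by omega) hm]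
        rw [List.drop_zero, hdrop]
        have hr : m.toNat = (m - 1).toNat + 1 := by omega
        rw [hr, PySem.List.combinations_cons_succ]
        simp [List.map_map, Function.comp, List.append_assoc]
    · rw [if_neg hb]
      rw [PySem.List.combinations_eq_nil_of_length_lt (lst.drop i)
        (by rw [List.length_drop]; omega)]
      simp

-- ===== VERDICT (by name: the statement is the Claim_ definition above) =====
theorem solution_spec : Claim_equal_solution := by
  intro lst m res ret _hdom hpre
  unfold Spec_solution
  have hm : 1 ≤ m := hpre
  rw [solution, go_eq lst.length lst m res ret 0 (by omega) hm, List.drop_zero,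
    alt_eq lst m res ret (by omega)]
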